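-- pv_equiv track=rewrite | github.com/Nononananee/Novr | memory/memory_management_system.py | _detect_scene_breaks
-- ===== SOURCE A (Python) =====
-- from typing import Dict, List, Optional, Tuple, Any
--
-- def _detect_scene_breaks(content: str) -> List[str]:
--     """Detect natural scene breaks in content"""
--     # Look for scene break indicators
--     scene_indicators = [
--         "\n\n***\n\n",  # Explicit scene break
--         "\n\n---\n\n",  # Alternative scene break
--         "Chapter ",      # Chapter break
--         "\n\nTime:",     # Time jump
--         "\n\nLocation:", # Location change
--     ]
--
--     scenes = []
--     current_scene = []
--     lines = content.split('\n')
--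
--     for line in lines:
--         # Check for scene break
--         is_break = any(indicator in line for indicator in scene_indicators)
--
--         if is_break and current_scene:
--             scenes.append('\n'.join(current_scene))
--             current_scene = [line]
--         else:
--             current_scene.append(line)
--
--     # Add final scene
--     if current_scene:
--         scenes.append('\n'.join(current_scene))
--
--     return scenes
-- ===== SOURCE B (Python) =====
-- from typing import List
--
-- def _detect_scene_breaks(content: str) -> List[str]:
--     """Detect natural scene breaks in content (recursive span splitting)."""
--     scene_indicators = [
--         "\n\n***\n\n",
--         "\n\n---\n\n",
--         "Chapter ",
--         "\n\nTime:",
--         "\n\nLocation:",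
--     ]
--
--     def is_break(line: str) -> bool:
--         return any(ind in line for ind in scene_indicators)
--
--     def go(first: str, rest: List[str]) -> List[str]:
--         k = next((j for j, l in enumerate(rest) if is_break(l)), len(rest))
--         scene = '\n'.join([first] + rest[:k])
--         if k < len(rest):
--             return [scene] + go(rest[k], rest[k + 1:])
--         return [scene]
--
--     lines = content.split('\n')
--     return go(lines[0], lines[1:])
-- ===== Notes on version B (the rewrite author's own statement) =====
-- stated objective: alternative
-- what changed: A does one fold over the lines carrying a scenes list and a current_scene accumulator; B recursively splits the line list at the next break line (find-first-break, slice one scene, recurse on the remainder).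
import Mathlib
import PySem

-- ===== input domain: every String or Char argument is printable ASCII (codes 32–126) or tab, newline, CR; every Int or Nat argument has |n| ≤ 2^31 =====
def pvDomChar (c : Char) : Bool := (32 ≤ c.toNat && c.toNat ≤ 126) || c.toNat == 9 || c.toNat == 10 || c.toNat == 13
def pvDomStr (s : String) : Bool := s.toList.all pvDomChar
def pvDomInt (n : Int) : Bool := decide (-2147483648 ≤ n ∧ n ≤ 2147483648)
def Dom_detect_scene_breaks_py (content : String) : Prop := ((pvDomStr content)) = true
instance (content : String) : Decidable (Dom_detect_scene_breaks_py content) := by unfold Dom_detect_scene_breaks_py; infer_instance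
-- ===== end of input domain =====

-- B replaces A's accumulator fold (scenes / current_scene lists) by a recursive span
-- decomposition: find the next break line, slice off one scene, recurse (objective: alternative).

-- ===== PORT A =====
def sceneIndicatorsA : List String :=
  ["\n\n***\n\n", "\n\n---\n\n", "Chapter ", "\n\nTime:", "\n\nLocation:"]

def stepA (st : List String × List String) (line : String) : List String × List String :=
  let is_break := sceneIndicatorsA.any (fun indicator => PySem.Str.isIn indicator line)
  if is_break && !st.2.isEmpty then (st.1 ++ [PySem.Str.join "\n" st.2], [line])
  else (st.1, st.2 ++ [line])

def detect_scene_breaks_py (content : String) : List String :=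
  let lines := (PySem.Str.split? content "\n").getD []   -- some: the separator "\n" is nonempty
  let st := lines.foldl stepA ([], [])
  if !st.2.isEmpty then st.1 ++ [PySem.Str.join "\n" st.2] else st.1

-- ===== PORT B =====
def sceneIndicatorsB : List String :=
  ["\n\n***\n\n", "\n\n---\n\n", "Chapter ", "\n\nTime:", "\n\nLocation:"]

def isBreakB (line : String) : Bool :=
  sceneIndicatorsB.any (fun ind => PySem.Str.isIn ind line)

def goB (first : String) (rest : List String) : List String :=
  let k := rest.findIdx isBreakB
  if h : k < rest.length then
    PySem.Str.join "\n" (first :: rest.take k) :: goB rest[k] (rest.drop (k + 1))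
  else [PySem.Str.join "\n" (first :: rest.take k)]
termination_by rest.length
decreasing_by simp only [List.length_drop]; omega

def detect_scene_breaks_py_alt (content : String) : List String :=
  match (PySem.Str.split? content "\n").getD [] with   -- some: the separator "\n" is nonempty
  | [] => []   -- unreachable: Python str.split always yields at least one piece
  | first :: rest => goB first rest

-- ===== PRECONDITION & SPEC =====
def Spec_detect_scene_breaks_py (content : String) (out : List String) : Prop := out = detect_scene_breaks_py_alt content
instance (content : String) (out : List String) : Decidable (Spec_detect_scene_breaks_py content out) := by unfold Spec_detect_scene_breaks_py; infer_instance

-- ===== CLAIM (what is proved, stated in full; the proofs are below) =====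
def Claim_equal_detect_scene_breaks_py : Prop := ∀ (content : String), Dom_detect_scene_breaks_py content → Spec_detect_scene_breaks_py content (detect_scene_breaks_py content)

-- ===== LEMMAS AND PROOFS =====

-- goB generalized to an accumulated (nonempty) current scene `cur` instead of a single first line
def goB2 (cur : List String) (rest : List String) : List String :=
  let k := rest.findIdx isBreakB
  if h : k < rest.length then
    PySem.Str.join "\n" (cur ++ rest.take k) :: goB rest[k] (rest.drop (k + 1))
  else [PySem.Str.join "\n" (cur ++ rest.take k)]

theorem goB2_single (l : String) (rest : List String) : goB2 [l] rest = goB l rest := by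
  unfold goB2
  rw [goB]
  simp

theorem goB2_cons_break (l : String) (rest cur : List String) (hb : isBreakB l = true) :
    goB2 cur (l :: rest) = PySem.Str.join "\n" cur :: goB l rest := by
  unfold goB2
  simp [List.findIdx_cons, hb]

theorem goB2_cons_not_break (l : String) (rest cur : List String) (hb : isBreakB l = false) :
    goB2 cur (l :: rest) = goB2 (cur ++ [l]) rest := by
  unfold goB2
  simp only [List.findIdx_cons, hb, cond_false, List.length_cons]
  by_cases h : rest.findIdx isBreakB < rest.length
  · rw [dif_pos (by omega), dif_pos h]
    simp
  · rw [dif_neg (by omega), dif_neg h]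
    simp

def finA (st : List String × List String) : List String :=
  if !st.2.isEmpty then st.1 ++ [PySem.Str.join "\n" st.2] else st.1

theorem key (rest : List String) : ∀ (scs cur : List String), cur ≠ [] →
    finA (rest.foldl stepA (scs, cur)) = scs ++ goB2 cur rest := by
  induction rest with
  | nil =>
    intro scs cur hcur
    unfold finA goB2
    simp [hcur]
  | cons l rest ih =>
    intro scs cur hcur
    simp only [List.foldl_cons]
    have hstep : stepA (scs, cur) l =
        if isBreakB l then (scs ++ [PySem.Str.join "\n" cur], [l])
        else (scs, cur ++ [l]) := by
      unfold stepA isBreakB sceneIndicatorsA sceneIndicatorsB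
      simp [hcur]
    rw [hstep]
    by_cases hb : isBreakB l = true
    · rw [if_pos hb, ih _ [l] (by simp), goB2_cons_break l rest cur hb, goB2_single]
      simp
    · rw [if_neg hb, ih _ (cur ++ [l]) (by simp),
        goB2_cons_not_break l rest cur (by simpa using hb)]

-- ===== VERDICT (by name: the statement is the Claim_ definition above) =====
theorem detect_scene_breaks_py_spec : Claim_equal_detect_scene_breaks_py := by
  intro content _
  unfold Spec_detect_scene_breaks_py detect_scene_breaks_py detect_scene_breaks_py_alt
  obtain ⟨lines, hl⟩ : ∃ l, PySem.Str.split? content "\n" = some l := by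
    simp [PySem.Str.split?, PySem.Chars.split?]
  simp only [hl, Option.getD_some]
  cases lines with
  | nil => simp
  | cons first tail =>
    simp only [List.foldl_cons]
    have h0 : stepA ([], []) first = ([], [first]) := by
      unfold stepA; simp
    rw [h0]
    have := key tail [] [first] (by simp)
    unfold finA at this
    rw [this, goB2_single]
    simp
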